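-- pv_equiv track=rewrite | github.com/josei150/data_countries | roman_numerals.py | set_limits
-- ===== SOURCE A (Python) =====
-- from typing import List, Tuple
--
-- roman_numbers: List[Tuple[str, int]] = [("I", 1), ("V", 5), ("X", 10), ("L", 50), ("C", 100), ("D", 500), ("M", 1000)]
--
-- def set_limits(number, limit_up, limit_down, new_list):
--     """
--     Returns a list of Roman numerals less than the entered value and one greater than it and also determines
--     the upper and lower bounds of that list according to the entered value
--     """
--     for index, number_in_list in enumerate(roman_numbers):
--         if roman_numbers[index][1] < number:
--             new_list.append(number_in_list)
--             limit_down = number_in_list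
--             continue
--         new_list.append(number_in_list)
--         break
--     limit_up: Tuple[str, int] = new_list[-1]
--     return limit_up, limit_down, new_list
-- ===== SOURCE B (Python) =====
-- from typing import List, Tuple
--
-- roman_numbers: List[Tuple[str, int]] = [("I", 1), ("V", 5), ("X", 10), ("L", 50), ("C", 100), ("D", 500), ("M", 1000)]
--
-- def set_limits(number, limit_up, limit_down, new_list):
--     # Count how many values are strictly below `number` (the list is sorted ascending),
--     # then build the result in phases: the strictly-smaller prefix, the one boundary
--     # element (if any), the lower bound from the prefix, the upper bound as the tail.
--     k = sum(1 for _, v in roman_numbers if v < number)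
--     new_list.extend(roman_numbers[:k])
--     if k < len(roman_numbers):
--         new_list.append(roman_numbers[k])
--     if k > 0:
--         limit_down = roman_numbers[k - 1]
--     limit_up = new_list[-1]
--     return limit_up, limit_down, new_list
-- ===== Notes on version B (the rewrite author's own statement) =====
-- stated objective: alternative
-- what changed: Replaces A's enumerate/break loop that appends element by element with a split-index decomposition: count k of values strictly below number, then extend with the prefix slice, append the single boundary element when k<7, and read both limits by indexing.
import Mathlib
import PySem

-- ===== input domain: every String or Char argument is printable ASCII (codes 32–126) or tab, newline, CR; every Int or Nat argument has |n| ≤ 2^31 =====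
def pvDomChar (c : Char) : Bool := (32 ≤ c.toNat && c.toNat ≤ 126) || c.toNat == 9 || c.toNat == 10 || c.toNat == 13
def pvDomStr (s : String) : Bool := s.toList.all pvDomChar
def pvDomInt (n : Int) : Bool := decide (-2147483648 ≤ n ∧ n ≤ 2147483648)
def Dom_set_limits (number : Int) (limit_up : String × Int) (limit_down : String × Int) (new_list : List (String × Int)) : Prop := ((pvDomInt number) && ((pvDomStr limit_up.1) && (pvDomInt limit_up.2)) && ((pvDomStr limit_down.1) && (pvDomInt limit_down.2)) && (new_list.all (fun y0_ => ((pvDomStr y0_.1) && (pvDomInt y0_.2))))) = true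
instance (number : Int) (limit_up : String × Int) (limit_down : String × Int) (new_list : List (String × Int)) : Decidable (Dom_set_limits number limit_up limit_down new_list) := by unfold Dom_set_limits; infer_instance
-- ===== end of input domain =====

-- B replaces A's enumerate/break loop by a split-index decomposition (count, slice, one
-- boundary append, indexed limits); equal cost on the fixed table. A mutates new_list in
-- place (appends); B performs the same mutation; the Lean claim is about the return value.
-- ===== PORT A =====
def romanNumbers : List (String × Int) := [("I", 1), ("V", 5), ("X", 10), ("L", 50), ("C", 100), ("D", 500), ("M", 1000)]

-- loop of A: append while value < number, append the first non-smaller element and stop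
def setLimitsLoopA (number : Int) (rs : List (String × Int)) (limit_down : String × Int) (acc : List (String × Int)) : (String × Int) × List (String × Int) :=
  match rs with
  | [] => (limit_down, acc)
  | r :: rest =>
    if r.2 < number then setLimitsLoopA number rest r (acc ++ [r])
    else (limit_down, acc ++ [r])

def set_limits (number : Int) (limit_up : String × Int) (limit_down : String × Int) (new_list : List (String × Int)) : (String × Int) × (String × Int) × (List (String × Int)) :=
  let p := setLimitsLoopA number romanNumbers limit_down new_list
  -- new_list[-1]: never raises here since romanNumbers is nonempty, so at least one append happened
  let lu := (PySem.List.pyGet? p.2 (-1)).getD ("", 0)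
  (lu, p.1, p.2)

-- ===== PORT B =====
def set_limits_alt (number : Int) (limit_up : String × Int) (limit_down : String × Int) (new_list : List (String × Int)) : (String × Int) × (String × Int) × (List (String × Int)) :=
  let k := (romanNumbers.filter (fun r => r.2 < number)).length
  let nl := new_list ++ romanNumbers.take k ++ (if k < 7 then [(PySem.List.pyGet? romanNumbers (k : Int)).getD ("", 0)] else [])
  let ld := if 0 < k then (PySem.List.pyGet? romanNumbers ((k : Int) - 1)).getD ("", 0) else limit_down
  let lu := (PySem.List.pyGet? nl (-1)).getD ("", 0)
  (lu, ld, nl)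

-- ===== PRECONDITION & SPEC =====
def Spec_set_limits (number : Int) (limit_up : String × Int) (limit_down : String × Int) (new_list : List (String × Int)) (out : (String × Int) × (String × Int) × (List (String × Int))) : Prop := out = set_limits_alt number limit_up limit_down new_list
instance (number : Int) (limit_up : String × Int) (limit_down : String × Int) (new_list : List (String × Int)) (out : (String × Int) × (String × Int) × (List (String × Int))) : Decidable (Spec_set_limits number limit_up limit_down new_list out) := by unfold Spec_set_limits; infer_instance

-- ===== CLAIM (what is proved, stated in full; the proofs are below) =====
def Claim_equal_set_limits : Prop := ∀ (number : Int) (limit_up : String × Int) (limit_down : String × Int) (new_list : List (String × Int)), Dom_set_limits number limit_up limit_down new_list → Spec_set_limits number limit_up limit_down new_list (set_limits number limit_up limit_down new_list)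

-- ===== LEMMAS AND PROOFS =====

-- ===== VERDICT (by name: the statement is the Claim_ definition above) =====
theorem set_limits_spec : Claim_equal_set_limits := by
  intro number limit_up limit_down new_list _
  unfold Spec_set_limits
  by_cases h1 : (1:Int) < number
  · by_cases h2 : (5:Int) < number
    · by_cases h3 : (10:Int) < number
      · by_cases h4 : (50:Int) < number
        · by_cases h5 : (100:Int) < number
          · by_cases h6 : (500:Int) < number
            · by_cases h7 : (1000:Int) < number
              · simp [set_limits, set_limits_alt, setLimitsLoopA, romanNumbers, PySem.List.pyGet?, PySem.List.pyIdx?, h1, h2, h3, h4, h5, h6, h7]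
              · simp [set_limits, set_limits_alt, setLimitsLoopA, romanNumbers, PySem.List.pyGet?, PySem.List.pyIdx?, h1, h2, h3, h4, h5, h6, h7]
            · simp [set_limits, set_limits_alt, setLimitsLoopA, romanNumbers, PySem.List.pyGet?, PySem.List.pyIdx?, h1, h2, h3, h4, h5, h6, show ¬(1000:Int) < number by omega]
          · simp [set_limits, set_limits_alt, setLimitsLoopA, romanNumbers, PySem.List.pyGet?, PySem.List.pyIdx?, h1, h2, h3, h4, h5, show ¬(500:Int) < number by omega,
              show ¬(1000:Int) < number by omega]
        · simp [set_limits, set_limits_alt, setLimitsLoopA, romanNumbers, PySem.List.pyGet?, PySem.List.pyIdx?, h1, h2, h3, h4, show ¬(100:Int) < number by omega,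
            show ¬(500:Int) < number by omega, show ¬(1000:Int) < number by omega]
      · simp [set_limits, set_limits_alt, setLimitsLoopA, romanNumbers, PySem.List.pyGet?, PySem.List.pyIdx?, h1, h2, h3, show ¬(50:Int) < number by omega,
          show ¬(100:Int) < number by omega, show ¬(500:Int) < number by omega,
          show ¬(1000:Int) < number by omega]
    · simp [set_limits, set_limits_alt, setLimitsLoopA, romanNumbers, PySem.List.pyGet?, PySem.List.pyIdx?, h1, h2, show ¬(10:Int) < number by omega,
        show ¬(50:Int) < number by omega, show ¬(100:Int) < number by omega,
        show ¬(500:Int) < number by omega, show ¬(1000:Int) < number by omega]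
  · simp [set_limits, set_limits_alt, setLimitsLoopA, romanNumbers, PySem.List.pyGet?, PySem.List.pyIdx?, h1, show ¬(5:Int) < number by omega, show ¬(10:Int) < number by omega,
      show ¬(50:Int) < number by omega, show ¬(100:Int) < number by omega,
      show ¬(500:Int) < number by omega, show ¬(1000:Int) < number by omega]
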